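-- pv_equiv track=rewrite | github.com/harlanljones/march-madness | src/evaluate.py | espn_bracket_score
-- ===== SOURCE A (Python) =====
-- def espn_bracket_score(predicted_winners: list[int], actual_winners: list[int]) -> int:
--     """Score a bracket using ESPN-style scoring.
--
--     Points per round: 10, 20, 40, 80, 160, 320
--     63 games total: 32 + 16 + 8 + 4 + 2 + 1
--     """
--     round_points = [10, 20, 40, 80, 160, 320]
--     round_sizes = [32, 16, 8, 4, 2, 1]
--
--     total = 0
--     idx = 0
--     for rnd, (size, pts) in enumerate(zip(round_sizes, round_points)):
--         for i in range(size):
--             if idx < len(predicted_winners) and idx < len(actual_winners):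
--                 if predicted_winners[idx] == actual_winners[idx]:
--                     total += pts
--             idx += 1
--
--     return total
-- ===== SOURCE B (Python) =====
-- def espn_bracket_score(predicted_winners: list[int], actual_winners: list[int]) -> int:
--     """Score the bracket without a weights table: a game's round (and thus its
--     points) is recovered in closed form from its index, since 63 - idx counts
--     the games remaining and its bit_length identifies the round.  Points for
--     game idx are 10 << (6 - (63 - idx).bit_length())."""
--     total = 0
--     for idx in range(min(len(predicted_winners), len(actual_winners), 63)):
--         if predicted_winners[idx] == actual_winners[idx]:
--             total += 10 << (6 - (63 - idx).bit_length())
--     return total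
-- ===== Notes on version B (the rewrite author's own statement) =====
-- stated objective: alternative
-- what changed: Drops the round-points/round-sizes tables and A's nested round/game loops entirely: B runs one loop over the first min(len, 63) games and computes each game's points in closed form from its index, 10 << (6 - (63 - idx).bit_length()), since 63 - idx (games remaining) determines the round by its bit length.
import Mathlib
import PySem

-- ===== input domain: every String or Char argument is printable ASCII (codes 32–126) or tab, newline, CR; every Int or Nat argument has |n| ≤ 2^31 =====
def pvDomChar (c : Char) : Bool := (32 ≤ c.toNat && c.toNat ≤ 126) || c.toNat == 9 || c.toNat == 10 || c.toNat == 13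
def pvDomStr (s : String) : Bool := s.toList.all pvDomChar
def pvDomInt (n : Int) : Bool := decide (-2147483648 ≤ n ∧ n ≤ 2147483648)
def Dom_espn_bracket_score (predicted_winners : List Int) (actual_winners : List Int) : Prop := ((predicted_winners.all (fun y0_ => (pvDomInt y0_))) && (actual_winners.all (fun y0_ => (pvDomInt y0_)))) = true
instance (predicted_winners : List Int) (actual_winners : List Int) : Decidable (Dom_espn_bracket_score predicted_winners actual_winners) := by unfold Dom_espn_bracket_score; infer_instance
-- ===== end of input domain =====

-- B drops A's weights table and nested round loops: one loop over the first
-- min(len, 63) games, computing each game's points in closed form from its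
-- index via bit_length (objective: alternative).

-- ===== PORT A =====
-- inner-loop body of A: the game loop's step, state (total, idx)
def pvInnerStep (predicted_winners actual_winners : List Int) (pts : Int)
    (st : Int × Int) (_i : Int) : Int × Int :=
  if st.2 < (predicted_winners.length : Int) ∧ st.2 < (actual_winners.length : Int) then
    (if PySem.List.pyGet? predicted_winners st.2 = PySem.List.pyGet? actual_winners st.2 then
      (st.1 + pts, st.2 + 1)
    else (st.1, st.2 + 1))
  else (st.1, st.2 + 1)

def espn_bracket_score (predicted_winners : List Int) (actual_winners : List Int) : Int :=
  let round_points : List Int := [10, 20, 40, 80, 160, 320]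
  let round_sizes : List Int := [32, 16, 8, 4, 2, 1]
  ((PySem.List.enumerate (round_sizes.zip round_points) 0).foldl
    (fun st rp =>
      (PySem.List.pyRange 0 rp.2.1 1).foldl (pvInnerStep predicted_winners actual_winners rp.2.2) st)
    (0, 0)).1

-- ===== PORT B =====
-- points of game idx: Python's 10 << (6 - (63 - idx).bit_length());
-- exact for 0 ≤ idx < 63 (the only indices the loop reaches), where
-- (63 - idx).bit_length() = Nat.log2 (63 - idx) + 1
def pvw (idx : Int) : Int := 10 * 2 ^ (6 - ((63 - idx).toNat.log2 + 1))

-- body of B's loop over range(min(len, len, 63))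
def pvBStep (predicted_winners actual_winners : List Int) (total : Int) (idx : Int) : Int :=
  if PySem.List.pyGet? predicted_winners idx = PySem.List.pyGet? actual_winners idx then
    total + pvw idx
  else total

def espn_bracket_score_alt (predicted_winners : List Int) (actual_winners : List Int) : Int :=
  let n : Int := min (min (predicted_winners.length : Int) (actual_winners.length : Int)) 63
  (PySem.List.pyRange 0 n 1).foldl (pvBStep predicted_winners actual_winners) 0

-- ===== PRECONDITION & SPEC =====
def Spec_espn_bracket_score (predicted_winners : List Int) (actual_winners : List Int) (out : Int) : Prop := out = espn_bracket_score_alt predicted_winners actual_winners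
instance (predicted_winners : List Int) (actual_winners : List Int) (out : Int) : Decidable (Spec_espn_bracket_score predicted_winners actual_winners out) := by unfold Spec_espn_bracket_score; infer_instance

-- ===== CLAIM (what is proved, stated in full; the proofs are below) =====
def Claim_equal_espn_bracket_score : Prop := ∀ (predicted_winners : List Int) (actual_winners : List Int), Dom_espn_bracket_score predicted_winners actual_winners → Spec_espn_bracket_score predicted_winners actual_winners (espn_bracket_score predicted_winners actual_winners)

-- ===== LEMMAS AND PROOFS =====

-- the points A's guarded comparison contributes at index idx with weight w
def pvContrib (p a : List Int) (idx w : Int) : Int :=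
  if idx < (p.length : Int) ∧ idx < (a.length : Int) then
    (if PySem.List.pyGet? p idx = PySem.List.pyGet? a idx then w else 0)
  else 0

-- total contribution of n games of weight w starting at index idx (A's shape)
def pvSegN (p a : List Int) (idx : Int) (n : Nat) (w : Int) : Int :=
  match n with
  | 0 => 0
  | n + 1 => pvSegN p a idx n w + pvContrib p a (idx + n) w

-- guarded sum of k games from index idx with closed-form weights
def pvG (p a : List Int) (idx : Nat) : Nat → Int
  | 0 => 0
  | k + 1 => pvG p a idx k + pvContrib p a ((idx + k : Nat) : Int) (pvw ((idx + k : Nat) : Int))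

-- unguarded sum of k games from index idx with closed-form weights (B's shape)
def pvB (p a : List Int) (idx : Nat) : Nat → Int
  | 0 => 0
  | k + 1 => pvB p a idx k +
      (if PySem.List.pyGet? p ((idx + k : Nat) : Int) = PySem.List.pyGet? a ((idx + k : Nat) : Int)
       then pvw ((idx + k : Nat) : Int) else 0)

theorem pvInner_eq (p a : List Int) (w : Int) (n : Nat) : ∀ (total idx : Int),
    (PySem.List.pyRange 0 (n : Int) 1).foldl (pvInnerStep p a w) (total, idx)
      = (total + pvSegN p a idx n w, idx + n) := by
  induction n with
  | zero => intro total idx; simp [PySem.List.pyRange_one_eq_nil, pvSegN]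
  | succ n ih =>
    intro total idx
    have h : ((n + 1 : Nat) : Int) = (n : Int) + 1 := by push_cast; ring
    rw [h, PySem.List.pyRange_one_succ_right (by positivity), List.foldl_append, ih]
    simp only [List.foldl_cons, List.foldl_nil, pvInnerStep, pvSegN, pvContrib]
    split_ifs <;> simp only [Prod.mk.injEq] <;> constructor <;> push_cast <;> ring

theorem pvInner_eq' (p a : List Int) (w n total idx : Int) (hn : 0 ≤ n) :
    (PySem.List.pyRange 0 n 1).foldl (pvInnerStep p a w) (total, idx)
      = (total + pvSegN p a idx n.toNat w, idx + n.toNat) := by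
  obtain ⟨m, rfl⟩ := Int.eq_ofNat_of_zero_le hn
  simp [pvInner_eq]

theorem pvG_split (p a : List Int) (idx m : Nat) : ∀ k,
    pvG p a idx (m + k) = pvG p a idx m + pvG p a (idx + m) k := by
  intro k
  induction k with
  | zero => simp [pvG]
  | succ k ih =>
    show pvG p a idx ((m + k) + 1) = _
    rw [pvG, ih, pvG]
    have : idx + (m + k) = (idx + m) + k := by omega
    rw [this]; ring

theorem pvG_zero (p a : List Int) (idx : Nat)
    (h : min p.length a.length ≤ idx) : ∀ k, pvG p a idx k = 0 := by
  intro k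
  induction k with
  | zero => rfl
  | succ k ih =>
    rw [pvG, ih, pvContrib, if_neg]
    · ring
    · push_cast; omega

theorem pvG_eq_pvB (p a : List Int) (idx : Nat) : ∀ k,
    idx + k ≤ p.length → idx + k ≤ a.length → pvG p a idx k = pvB p a idx k := by
  intro k
  induction k with
  | zero => intro _ _; rfl
  | succ k ih =>
    intro h1 h2
    rw [pvG, pvB, ih (by omega) (by omega), pvContrib, if_pos (by push_cast; omega)]

theorem pvG_eq_segN (p a : List Int) (w : Int) (idx : Nat) : ∀ k,
    (∀ j : Nat, idx ≤ j → j < idx + k → pvw (j : Int) = w) →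
    pvG p a idx k = pvSegN p a (idx : Int) k w := by
  intro k
  induction k with
  | zero => intro _; rfl
  | succ k ih =>
    intro h
    have hc : ((idx + k : Nat) : Int) = (idx : Int) + (k : Int) := by push_cast; ring
    rw [pvG, pvSegN, ih (fun j h1 h2 => h j h1 (by omega)),
        h (idx + k) (by omega) (by omega), hc]

theorem pvB_fold (p a : List Int) : ∀ (k : Nat) (total : Int),
    (PySem.List.pyRange 0 (k : Int) 1).foldl (pvBStep p a) total = total + pvB p a 0 k := by
  intro k
  induction k with
  | zero => intro total; simp [PySem.List.pyRange_one_eq_nil, pvB]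
  | succ k ih =>
    intro total
    have h : ((k + 1 : Nat) : Int) = (k : Int) + 1 := by push_cast; ring
    rw [h, PySem.List.pyRange_one_succ_right (by positivity), List.foldl_append, ih]
    simp only [List.foldl_cons, List.foldl_nil, pvBStep, pvB, Nat.zero_add]
    split_ifs <;> ring

theorem pvA_eq_pvG (p a : List Int) : espn_bracket_score p a = pvG p a 0 63 := by
  unfold espn_bracket_score
  dsimp only
  rw [show PySem.List.enumerate (([32, 16, 8, 4, 2, 1] : List Int).zip ([10, 20, 40, 80, 160, 320] : List Int)) 0
      = [(0, (32, 10)), (1, (16, 20)), (2, (8, 40)), (3, (4, 80)), (4, (2, 160)), (5, (1, 320))] from by decide]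
  simp only [List.foldl_cons, List.foldl_nil]
  rw [pvInner_eq' p a 10 32 _ _ (by norm_num), pvInner_eq' p a 20 16 _ _ (by norm_num),
      pvInner_eq' p a 40 8 _ _ (by norm_num), pvInner_eq' p a 80 4 _ _ (by norm_num),
      pvInner_eq' p a 160 2 _ _ (by norm_num), pvInner_eq' p a 320 1 _ _ (by norm_num)]
  have h63 : (63 : Nat) = 32 + (16 + (8 + (4 + (2 + 1)))) := by norm_num
  rw [h63, pvG_split, pvG_split, pvG_split, pvG_split, pvG_split]
  rw [pvG_eq_segN p a 10 0 32 (by intro j h1 h2; interval_cases j <;> decide),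
      pvG_eq_segN p a 20 32 16 (by intro j h1 h2; interval_cases j <;> decide),
      pvG_eq_segN p a 40 48 8 (by intro j h1 h2; interval_cases j <;> decide),
      pvG_eq_segN p a 80 56 4 (by intro j h1 h2; interval_cases j <;> decide),
      pvG_eq_segN p a 160 60 2 (by intro j h1 h2; interval_cases j <;> decide),
      pvG_eq_segN p a 320 62 1 (by intro j h1 h2; interval_cases j <;> decide)]
  norm_num [show Int.toNat 32 = 32 from rfl, show Int.toNat 16 = 16 from rfl,
    show Int.toNat 8 = 8 from rfl, show Int.toNat 4 = 4 from rfl, show Int.toNat 2 = 2 from rfl]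
  ring

theorem espn_bracket_score_eq (p a : List Int) :
    espn_bracket_score p a = espn_bracket_score_alt p a := by
  rw [pvA_eq_pvG]
  unfold espn_bracket_score_alt
  dsimp only
  set L : Nat := min p.length a.length with hL
  set n : Nat := min L 63 with hn
  have hcast : min (min (p.length : Int) (a.length : Int)) 63 = (n : Int) := by
    simp only [hn, hL]; push_cast; omega
  rw [hcast, pvB_fold p a n 0, zero_add]
  have hsplit : (63 : Nat) = n + (63 - n) := by omega
  rw [hsplit, pvG_split]
  have hzero : pvG p a (0 + n) (63 - n) = 0 := by
    by_cases h : L < 63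
    · exact pvG_zero p a (0 + n) (by omega) _
    · have : 63 - n = 0 := by omega
      rw [this]; rfl
  rw [hzero, add_zero]
  exact pvG_eq_pvB p a 0 n (by omega) (by omega)

-- ===== VERDICT (by name: the statement is the Claim_ definition above) =====
theorem espn_bracket_score_spec : Claim_equal_espn_bracket_score := by
  intro p a _
  unfold Spec_espn_bracket_score
  exact espn_bracket_score_eq p a
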